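-- pv_equiv track=rewrite | github.com/blillard/vsdm | vsdm/haar.py | _hs_n_to_hstr_inclusive
-- ===== SOURCE A (Python) =====
-- def _hs_subdivideAt(hstr, n, level=1):
--     out = []
--     for item in hstr:
--         if item==n:
--             out += [2**level*n + mu for mu in range(2**level)]
--         else:
--             out += [item]
--     return out
--
-- def _hs_n_to_hstr_inclusive(n_list):
--     """Returns the smallest HaarString that covers all n in n_list."""
--     # Subdivide each n in hstr until the descendant
--     to_subdivide = []
--     for n in n_list:
--         if n==0: continue
--         m = n
--         while m!=1:
--             if m%2==0:
--                 m = int(m/2)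
--             else:
--                 m = int((m-1)/2)
--             if m not in to_subdivide:
--                 to_subdivide += [m]
--     # return to_subdivide
--     # to_subdivide now lists all n that should be divided.
--     # want to keep hstr in domain order:
--     out = [1]
--     try_again = (len(to_subdivide)!=0)
--     skip_me = []
--     while try_again:
--         new = out
--         try_again = False
--         for n in out:
--             if n in skip_me:
--                 continue
--             if n in to_subdivide:
--                 try_again = True
--                 new = _hs_subdivideAt(new, n, level=1)
--             else:
--                 skip_me += [n]
--         # at end of round, update 'out'
--         out = new
--         # loop terminates (try_again=False) once a round goes by without any further subdivisions
--     return out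
-- ===== SOURCE B (Python) =====
-- def _hs_n_to_hstr_inclusive(n_list):
--     """Returns the smallest HaarString that covers all n in n_list."""
--     # Collect the set of internal (strict-ancestor) nodes of all listed n.
--     internal = set()
--     for n in n_list:
--         m = n // 2
--         while m >= 1:
--             internal.add(m)
--             m //= 2
--     # DFS the binary tree from the root, emitting leaves in domain order.
--     out = []
--
--     def emit(n):
--         if n in internal:
--             emit(2 * n)
--             emit(2 * n + 1)
--         else:
--             out.append(n)
--
--     emit(1)
--     return out
-- ===== Notes on version B (the rewrite author's own statement) =====
-- stated objective: alternative
-- what changed: B replaces A's repeated whole-list subdivision rounds (each round rescans the output list and rebuilds it via _hs_subdivideAt, with list membership tests against to_subdivide) by building the strict-ancestor set once (a hash set) and emitting the leaves with a single depth-first recursion over the binary tree.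
import Mathlib
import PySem

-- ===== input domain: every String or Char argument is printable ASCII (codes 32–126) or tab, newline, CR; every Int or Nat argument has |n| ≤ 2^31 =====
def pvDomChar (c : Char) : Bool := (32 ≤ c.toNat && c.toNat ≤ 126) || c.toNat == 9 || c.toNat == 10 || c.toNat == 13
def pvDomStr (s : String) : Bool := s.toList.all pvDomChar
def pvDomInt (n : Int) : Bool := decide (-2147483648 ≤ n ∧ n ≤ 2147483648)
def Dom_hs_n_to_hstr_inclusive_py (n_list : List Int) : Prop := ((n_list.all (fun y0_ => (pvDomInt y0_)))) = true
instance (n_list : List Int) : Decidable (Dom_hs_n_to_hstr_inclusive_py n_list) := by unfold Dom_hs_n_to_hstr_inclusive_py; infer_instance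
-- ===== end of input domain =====

-- B replaces A's repeated whole-list subdivision rounds by one ancestor-set pass plus a
-- single depth-first tree recursion; equal output proved on Pre_ (all n ≥ 0).


-- ===== PORT A =====
-- _hs_subdivideAt(hstr, n, level): 2**level is ported as 2^level.toNat (exact for the
-- nonnegative level A uses; A only ever calls it with level=1).
def hsSubdivideAt (hstr : List Int) (n : Int) (level : Int) : List Int :=
  hstr.foldl (fun out item =>
    if item = n then
      out ++ (PySem.List.pyRange 0 ((2:Int)^level.toNat) 1).map (fun mu => (2:Int)^level.toNat * n + mu)
    else out ++ [item]) []

-- inner 'while m != 1' loop of A; fuel-guarded only to make it total in Lean (64 halvings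
-- cover every |n| ≤ 2^31; on negative n the Python loop never terminates — excluded by Pre_).
-- int(m/2) (resp. int((m-1)/2)) is exact floor division on the even operand it is applied to.
def hsInner : Nat → Int → List Int → List Int
  | 0, _, acc => acc
  | f+1, m, acc =>
    if m = 1 then acc
    else
      let m' := if PySem.Int.mod m 2 = 0 then PySem.Int.floordiv m 2
                else PySem.Int.floordiv (m-1) 2
      let acc' := if m' ∈ acc then acc else acc ++ [m']
      hsInner f m' acc'

def hsToSubdivide (n_list : List Int) : List Int :=
  n_list.foldl (fun acc n => if n = 0 then acc else hsInner 64 n acc) []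

-- one round of A's while-loop: state (new, skip_me, try_again), iterating over the round's out
def hsRound (S out skip : List Int) : List Int × List Int × Bool :=
  out.foldl (fun st n =>
    if n ∈ st.2.1 then st
    else if n ∈ S then (hsSubdivideAt st.1 n 1, st.2.1, true)
    else (st.1, st.2.1 ++ [n], st.2.2)) (out, skip, false)

-- A's outer while-loop; fuel-guarded only to make it total in Lean (33 rounds suffice for
-- every input admitted by Pre_ ∧ Dom, as the proofs below establish).
def hsLoop (S : List Int) : Nat → List Int → List Int → Bool → List Int
  | _, out, _, false => out
  | 0, out, _, true => out
  | f+1, out, skip, true =>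
    let st := hsRound S out skip
    hsLoop S f st.1 st.2.1 st.2.2

def hs_n_to_hstr_inclusive_py (n_list : List Int) : List Int :=
  let toSub := hsToSubdivide n_list
  hsLoop toSub 64 [1] [] (decide (PySem.List.len toSub ≠ 0))

-- ===== PORT B =====
-- B's 'while m >= 1' ancestor loop (terminates structurally: m halves toward 0)
def altAnc (m : Int) (s : PySem.Set Int) : PySem.Set Int :=
  if _h : 1 ≤ m then altAnc (PySem.Int.floordiv m 2) (PySem.Set.add s m) else s
termination_by m.toNat
decreasing_by
  have : PySem.Int.floordiv m 2 = m / 2 := PySem.Int.floordiv_eq_ediv_of_pos (by omega)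
  rw [this]; omega

def altInternal (n_list : List Int) : PySem.Set Int :=
  n_list.foldl (fun s n => altAnc (PySem.Int.floordiv n 2) s) PySem.Set.empty

-- B's recursive emit; fuel-guarded only to make it total in Lean (depth ≤ 32 under Dom)
def altDfs (s : PySem.Set Int) : Nat → Int → List Int
  | 0, n => [n]
  | f+1, n =>
    if s.contains n then altDfs s f (2*n) ++ altDfs s f (2*n+1) else [n]

def hs_n_to_hstr_inclusive_py_alt (n_list : List Int) : List Int :=
  altDfs (altInternal n_list) 64 1

-- ===== PRECONDITION & SPEC =====
-- Pre_ excludes lists containing a negative n: there A's halving loop 'while m != 1' never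
-- reaches 1, so the Python A diverges (returns nothing).
def Pre_hs_n_to_hstr_inclusive_py (n_list : List Int) : Prop := ∀ n ∈ n_list, 0 ≤ n
instance (n_list : List Int) : Decidable (Pre_hs_n_to_hstr_inclusive_py n_list) := by
  unfold Pre_hs_n_to_hstr_inclusive_py; infer_instance

def pvWitness_hs_n_to_hstr_inclusive_py : List Int := [5, 3]

def Spec_hs_n_to_hstr_inclusive_py (n_list : List Int) (out : List Int) : Prop := out = hs_n_to_hstr_inclusive_py_alt n_list
instance (n_list : List Int) (out : List Int) : Decidable (Spec_hs_n_to_hstr_inclusive_py n_list out) := by unfold Spec_hs_n_to_hstr_inclusive_py; infer_instance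

-- ===== CLAIM (what is proved, stated in full; the proofs are below) =====
def Claim_equal_hs_n_to_hstr_inclusive_py : Prop := ∀ (n_list : List Int), Dom_hs_n_to_hstr_inclusive_py n_list → Pre_hs_n_to_hstr_inclusive_py n_list → Spec_hs_n_to_hstr_inclusive_py n_list (hs_n_to_hstr_inclusive_py n_list)

-- ===== LEMMAS AND PROOFS =====

-- proof-layer abstractions: one subdivision step and its iteration, for a membership predicate P
def pvStep (P : Int → Bool) (x : Int) : List Int := if P x then [2*x, 2*x+1] else [x]

def pvIter (P : Int → Bool) : Nat → List Int → List Int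
  | 0, xs => xs
  | k+1, xs => pvIter P k (xs.flatMap (pvStep P))

-- strict descendant in the infinite binary tree on positive integers
def pvSdesc (n m : Int) : Prop := ∃ j : Nat, 0 < j ∧ n / 2^j = m

def pvInv (xs : List Int) : Prop :=
  xs.Nodup ∧ (∀ x ∈ xs, 1 ≤ x) ∧ ∀ a ∈ xs, ∀ b ∈ xs, ¬ pvSdesc a b

def pvStab (P : Int → Bool) (k : Nat) : Prop := ∀ x ∈ pvIter P k [1], P x = false

-- ---- tree facts ----
theorem pv_ediv_pow_succ (n : Int) (j : Nat) : n / 2^(j+1) = (n/2) / 2^j := by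
  rw [pow_succ']
  exact (Int.ediv_ediv_of_nonneg (by norm_num : (0:Int) ≤ 2)).symm

theorem pv_sdesc_child' {a m : Int} (h : a = 2*m ∨ a = 2*m+1) : pvSdesc a m := by
  exact ⟨1, Nat.one_pos, by simp only [pow_one]; omega⟩

theorem pv_sdesc_trans {a b c : Int} (ha : 0 ≤ a) (h1 : pvSdesc a b) (h2 : pvSdesc b c) :
    pvSdesc a c := by
  obtain ⟨j1, hj1, e1⟩ := h1
  obtain ⟨j2, hj2, e2⟩ := h2
  refine ⟨j1 + j2, by omega, ?_⟩
  rw [pow_add, ← Int.ediv_ediv_of_nonneg (by positivity : (0:Int) ≤ 2^j1), e1, e2]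

theorem pv_sdesc_irrefl {a : Int} (ha : 1 ≤ a) : ¬ pvSdesc a a := by
  rintro ⟨j, hj, he⟩
  obtain ⟨j', rfl⟩ : ∃ j', j = j'+1 := ⟨j-1, by omega⟩
  rw [pv_ediv_pow_succ] at he
  have h1 : (a/2) / 2^j' ≤ a/2 := Int.ediv_le_self _ (by omega)
  omega

theorem pv_sdesc_parent {n m : Int} (hn : 0 ≤ n) (h : pvSdesc n m) :
    m = n / 2 ∨ pvSdesc (n/2) m := by
  obtain ⟨j, hj, he⟩ := h
  obtain ⟨j', rfl⟩ : ∃ j', j = j'+1 := ⟨j-1, by omega⟩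
  rw [pv_ediv_pow_succ] at he
  rcases Nat.eq_zero_or_pos j' with h0 | hpos
  · left; subst h0; simpa using he.symm
  · right; exact ⟨j', hpos, he⟩

-- ---- step / invariant facts ----
theorem pv_mem_step {P : Int → Bool} {y a : Int} (h : a ∈ pvStep P y) :
    (P y = false ∧ a = y) ∨ (P y = true ∧ (a = 2*y ∨ a = 2*y+1)) := by
  by_cases h' : P y = true
  · simp only [pvStep, h', if_true] at h
    right; refine ⟨h', ?_⟩; simpa using h
  · rw [Bool.not_eq_true] at h'
    simp only [pvStep, h', Bool.false_eq_true, if_false] at h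
    left; exact ⟨h', by simpa using h⟩

theorem pv_step_ne {P : Int → Bool} {xs : List Int} {y z a b : Int} (hInv : pvInv xs)
    (hy : y ∈ xs) (hz : z ∈ xs) (hyz : y ≠ z)
    (ha : a ∈ pvStep P y) (hb : b ∈ pvStep P z) : a ≠ b := by
  obtain ⟨hnd, hpos, hnsd⟩ := hInv
  have hy1 := hpos y hy
  have hz1 := hpos z hz
  rcases pv_mem_step ha with ⟨hPy, hay⟩ | ⟨hPy, hcy⟩ <;>
    rcases pv_mem_step hb with ⟨hPz, hbz⟩ | ⟨hPz, hcz⟩ <;> intro he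
  · exact hyz (by omega)
  · exact hnsd _ hy _ hz (pv_sdesc_child' (by omega))
  · exact hnsd _ hz _ hy (pv_sdesc_child' (by omega))
  · exact hyz (by omega)

theorem pv_step_not_sdesc {P : Int → Bool} {xs : List Int} {y z a b : Int} (hInv : pvInv xs)
    (hy : y ∈ xs) (hz : z ∈ xs) (ha : a ∈ pvStep P y) (hb : b ∈ pvStep P z) :
    ¬ pvSdesc a b := by
  obtain ⟨hnd, hpos, hnsd⟩ := hInv
  have hy1 := hpos y hy
  have hz1 := hpos z hz
  intro hsd
  rcases pv_mem_step ha with ⟨hPy, hay⟩ | ⟨hPy, hcy⟩ <;>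
    rcases pv_mem_step hb with ⟨hPz, hbz⟩ | ⟨hPz, hcz⟩
  · rw [hay, hbz] at hsd
    exact hnsd _ hy _ hz hsd
  · rw [hay] at hsd
    exact hnsd _ hy _ hz (pv_sdesc_trans (by omega) hsd (pv_sdesc_child' hcz))
  · rw [hbz] at hsd
    rcases pv_sdesc_parent (by omega : (0:Int) ≤ a) hsd with he | hsd'
    · have hzy : z = y := by omega
      rw [hzy, hPy] at hPz
      exact Bool.noConfusion hPz
    · have hay2 : a / 2 = y := by omega
      rw [hay2] at hsd'
      exact hnsd _ hy _ hz hsd'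
  · rcases pv_sdesc_parent (by omega : (0:Int) ≤ a) hsd with he | hsd'
    · exact hnsd _ hy _ hz (pv_sdesc_child' (by omega))
    · have hay2 : a / 2 = y := by omega
      rw [hay2] at hsd'
      exact hnsd _ hy _ hz (pv_sdesc_trans (by omega) hsd' (pv_sdesc_child' hcz))

theorem pv_inv_tail {x : Int} {xs : List Int} (h : pvInv (x :: xs)) : pvInv xs := by
  obtain ⟨h1, h2, h3⟩ := h
  exact ⟨h1.of_cons, fun x hx => h2 x (List.mem_cons_of_mem _ hx),
    fun a ha b hb => h3 a (List.mem_cons_of_mem _ ha) b (List.mem_cons_of_mem _ hb)⟩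

theorem pv_step_nodup (P : Int → Bool) (x : Int) : (pvStep P x).Nodup := by
  cases hP : P x <;> simp [pvStep, hP] <;> omega

theorem pv_nodup_step (P : Int → Bool) : ∀ xs, pvInv xs → (xs.flatMap (pvStep P)).Nodup := by
  intro xs
  induction xs with
  | nil => intro _; simp
  | cons x rest ih =>
    intro h
    rw [List.flatMap_cons, List.nodup_append]
    refine ⟨pv_step_nodup P x, ih (pv_inv_tail h), ?_⟩
    intro a hax b hbmem
    obtain ⟨z, hz, hbz⟩ := List.mem_flatMap.1 hbmem
    have hxz : x ≠ z := by
      rintro rfl; exact (List.nodup_cons.1 h.1).1 hz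
    exact pv_step_ne h List.mem_cons_self (List.mem_cons_of_mem _ hz) hxz hax hbz

theorem pv_inv_step (P : Int → Bool) {xs : List Int} (h : pvInv xs) :
    pvInv (xs.flatMap (pvStep P)) := by
  refine ⟨pv_nodup_step P xs h, ?_, ?_⟩
  · intro a ha
    obtain ⟨y, hy, hay⟩ := List.mem_flatMap.1 ha
    have hy1 := h.2.1 y hy
    rcases pv_mem_step hay with ⟨_, hay'⟩ | ⟨_, hc⟩ <;> omega
  · intro a ha b hb
    obtain ⟨y, hy, hay⟩ := List.mem_flatMap.1 ha
    obtain ⟨z, hz, hbz⟩ := List.mem_flatMap.1 hb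
    exact pv_step_not_sdesc h hy hz hay hbz

-- ---- iteration facts ----
theorem pv_iter_succ' (P : Int → Bool) (k : Nat) :
    ∀ xs, pvIter P (k+1) xs = (pvIter P k xs).flatMap (pvStep P) := by
  induction k with
  | zero => intro xs; rfl
  | succ k ih => intro xs; exact ih (xs.flatMap (pvStep P))

theorem pv_flatMap_fix {P : Int → Bool} {xs : List Int} (h : ∀ x ∈ xs, P x = false) :
    xs.flatMap (pvStep P) = xs := by
  induction xs with
  | nil => rfl
  | cons x rest ih =>
    have hx := h x List.mem_cons_self
    rw [List.flatMap_cons, ih (fun y hy => h y (List.mem_cons_of_mem _ hy))]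
    simp [pvStep, hx]

theorem pv_iter_fix {P : Int → Bool} (k : Nat) {xs : List Int} (h : ∀ x ∈ xs, P x = false) :
    pvIter P k xs = xs := by
  induction k with
  | zero => rfl
  | succ k ih =>
    show pvIter P k (xs.flatMap (pvStep P)) = xs
    rw [pv_flatMap_fix h, ih]

theorem pv_iter_append (P : Int → Bool) (k : Nat) :
    ∀ a b, pvIter P k (a ++ b) = pvIter P k a ++ pvIter P k b := by
  induction k with
  | zero => intro a b; rfl
  | succ k ih =>
    intro a b
    show pvIter P k ((a ++ b).flatMap (pvStep P)) = _
    rw [List.flatMap_append, ih]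
    rfl

theorem pv_inv_iter (P : Int → Bool) (k : Nat) : pvInv (pvIter P k [1]) := by
  induction k with
  | zero =>
    show pvInv [1]
    refine ⟨by simp, by simp, ?_⟩
    intro a ha b hb
    have ha' : a = 1 := by simpa [pvIter] using ha
    have hb' : b = 1 := by simpa [pvIter] using hb
    subst ha'; subst hb'
    exact pv_sdesc_irrefl (by norm_num)
  | succ k ih =>
    rw [pv_iter_succ']
    exact pv_inv_step P ih

theorem pv_stab_mono {P : Int → Bool} {k : Nat} (h : pvStab P k) :
    ∀ j, k ≤ j → pvIter P j [1] = pvIter P k [1] := by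
  intro j hj
  induction j with
  | zero =>
    have hk : k = 0 := by omega
    subst hk; rfl
  | succ j ih =>
    rcases Nat.lt_or_ge k (j+1) with hlt | hge
    · have hj' : k ≤ j := by omega
      rw [pv_iter_succ', ih hj', pv_flatMap_fix h]
    · have : k = j+1 := by omega
      subst this; rfl

theorem pv_growth {P : Int → Bool} (hb : ∀ x, P x = true → x ≤ 2^30) :
    ∀ k x, x ∈ pvIter P k [1] → P x = false ∨ 2^k ≤ x := by
  intro k
  induction k with
  | zero =>
    intro x hx
    simp [pvIter] at hx; subst hx
    right; norm_num
  | succ k ih =>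
    intro x hx
    rw [pv_iter_succ'] at hx
    obtain ⟨y, hy, hxy⟩ := List.mem_flatMap.1 hx
    rcases pv_mem_step hxy with ⟨hPy, rfl⟩ | ⟨hPy, hc⟩
    · left; exact hPy
    · rcases ih y hy with hf | hge
      · rw [hf] at hPy; cases hPy
      · right
        have hp : (2:Int)^(k+1) = 2 * 2^k := by ring
        omega

theorem pv_stab31 {P : Int → Bool} (hb : ∀ x, P x = true → x ≤ 2^30) : pvStab P 31 := by
  intro x hx
  rcases pv_growth hb 31 x hx with h | h
  · exact h
  · cases hP : P x
    · rfl
    · have hle := hb x hP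
      norm_num at h hle
      omega

-- ---- B-side: dfs = iteration ----
theorem pv_altDfs_eq (s : PySem.Set Int) :
    ∀ (f : Nat) (n : Int), altDfs s f n = pvIter (fun x => s.contains x) f [n] := by
  intro f
  induction f with
  | zero => intro n; rfl
  | succ f ih =>
    intro n
    simp only [altDfs]
    have hiter : pvIter (fun x => s.contains x) (f+1) [n]
        = pvIter (fun x => s.contains x) f ([n].flatMap (pvStep (fun x => s.contains x))) := rfl
    cases hc : s.contains n
    · have hns : n ∉ s := by simpa using hc
      rw [if_neg (by simp : ¬ (false = true))]
      rw [hiter]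
      have h1 : [n].flatMap (pvStep (fun x => s.contains x)) = [n] := by
        simp [pvStep, hns]
      rw [h1, pv_iter_fix]
      intro x hx; simp at hx; subst hx; exact hc
    · have hin : n ∈ s := by simpa using hc
      rw [if_pos rfl]
      rw [hiter]
      have h1 : [n].flatMap (pvStep (fun x => s.contains x)) = [2*n] ++ [2*n+1] := by
        simp [pvStep, hin]
      rw [h1, pv_iter_append, ih, ih]

-- ---- A-side: subdivision round = one flatMap step ----
theorem pv_subfold (n : Int) (c : List Int) : ∀ (l acc : List Int),
    l.foldl (fun out item => if item = n then out ++ c else out ++ [item]) acc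
      = acc ++ l.flatMap (fun x => if x = n then c else [x]) := by
  intro l
  induction l with
  | nil => intro acc; simp
  | cons x rest ih =>
    intro acc
    simp only [List.foldl_cons, List.flatMap_cons]
    by_cases hx : x = n <;> simp [hx, ih, List.append_assoc]

theorem pv_iter_eq31 {P : Int → Bool} (hb : ∀ x, P x = true → x ≤ 2^30) {k : Nat}
    (h : pvStab P k ∨ 31 ≤ k) : pvIter P k [1] = pvIter P 31 [1] := by
  have h31 := pv_stab31 hb
  rcases h with hst | hge
  · rcases Nat.le_total k 31 with hk | hk
    · exact (pv_stab_mono hst 31 hk).symm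
    · exact pv_stab_mono h31 k hk
  · exact pv_stab_mono h31 k hge

theorem pv_subAt_eq_flatMap (l : List Int) (n : Int) :
    hsSubdivideAt l n 1 = l.flatMap (fun x => if x = n then [2*n, 2*n+1] else [x]) := by
  unfold hsSubdivideAt
  have hc : (PySem.List.pyRange 0 ((2:Int)^((1:Int).toNat)) 1).map
      (fun mu => (2:Int)^((1:Int).toNat) * n + mu) = [2*n, 2*n+1] := by
    have h2 : ((2:Int)^((1:Int).toNat)) = 2 := by norm_num
    rw [h2, show PySem.List.pyRange 0 2 1 = [0, 1] from by decide]
    simp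
  rw [hc, pv_subfold]
  simp

theorem pv_flatMap_subAt_of_not_mem {l : List Int} {n : Int} (h : n ∉ l) :
    l.flatMap (fun x => if x = n then [2*n, 2*n+1] else [x]) = l := by
  induction l with
  | nil => rfl
  | cons x rest ih =>
    have hx : x ≠ n := fun e => h (e ▸ List.mem_cons_self)
    rw [List.flatMap_cons, if_neg hx, ih (fun hm => h (List.mem_cons_of_mem _ hm))]
    rfl

theorem pv_round_fold (S : List Int) :
    ∀ (xs pre skip : List Int) (ta : Bool),
    (∀ x ∈ xs, x ∉ pre) → xs.Nodup →
    (∀ a ∈ xs, ∀ b ∈ xs, a ≠ 2*b ∧ a ≠ 2*b+1) →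
    (∀ x ∈ skip, x ∉ S) →
    ∃ skip', (∀ x ∈ skip', x ∉ S) ∧
      xs.foldl (fun st n =>
        if n ∈ st.2.1 then st
        else if n ∈ S then (hsSubdivideAt st.1 n 1, st.2.1, true)
        else (st.1, st.2.1 ++ [n], st.2.2)) (pre ++ xs, skip, ta)
      = (pre ++ xs.flatMap (pvStep (fun x => decide (x ∈ S))), skip',
         ta || xs.any (fun x => decide (x ∈ S))) := by
  intro xs
  induction xs with
  | nil =>
    intro pre skip ta _ _ _ hskip
    exact ⟨skip, hskip, by simp⟩
  | cons x rest ih =>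
    intro pre skip ta hpre hnd hnc hskip
    have hxpre : x ∉ pre := hpre x List.mem_cons_self
    have hxrest : x ∉ rest := (List.nodup_cons.1 hnd).1
    simp only [List.foldl_cons]
    by_cases hxsk : x ∈ skip
    · have hxS : x ∉ S := hskip x hxsk
      rw [if_pos hxsk]
      have hassoc : pre ++ x :: rest = (pre ++ [x]) ++ rest := by simp
      rw [hassoc]
      obtain ⟨skip', hsk', heq⟩ := ih (pre ++ [x]) skip ta
        (fun r hr => by
          simp only [List.mem_append, List.mem_singleton]
          rintro (h1 | rfl)
          · exact hpre r (List.mem_cons_of_mem _ hr) h1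
          · exact hxrest hr)
        (List.nodup_cons.1 hnd).2
        (fun a ha b hb => hnc a (List.mem_cons_of_mem _ ha) b (List.mem_cons_of_mem _ hb))
        hskip
      refine ⟨skip', hsk', ?_⟩
      rw [heq]
      have hPx : decide (x ∈ S) = false := by simp [hxS]
      simp [pvStep, hPx, hxS]
    · rw [if_neg hxsk]
      by_cases hxS : x ∈ S
      · rw [if_pos hxS]
        have hsub : hsSubdivideAt (pre ++ x :: rest) x 1 = (pre ++ [2*x, 2*x+1]) ++ rest := by
          rw [pv_subAt_eq_flatMap, List.flatMap_append, List.flatMap_cons,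
            pv_flatMap_subAt_of_not_mem hxpre, pv_flatMap_subAt_of_not_mem hxrest,
            if_pos rfl]
          simp
        rw [hsub]
        obtain ⟨skip', hsk', heq⟩ := ih (pre ++ [2*x, 2*x+1]) skip true
          (fun r hr => by
            simp only [List.mem_append, List.mem_cons, List.mem_singleton]
            rintro (h1 | h2)
            · exact hpre r (List.mem_cons_of_mem _ hr) h1
            · have := hnc r (List.mem_cons_of_mem _ hr) x List.mem_cons_self
              rcases h2 with h2 | h2
              · exact this.1 h2
              · simp at h2
                exact this.2 h2)
          (List.nodup_cons.1 hnd).2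
          (fun a ha b hb => hnc a (List.mem_cons_of_mem _ ha) b (List.mem_cons_of_mem _ hb))
          hskip
        refine ⟨skip', hsk', ?_⟩
        rw [heq]
        have hPx : decide (x ∈ S) = true := by simp [hxS]
        simp [pvStep, hPx, hxS]
      · rw [if_neg hxS]
        have hassoc : pre ++ x :: rest = (pre ++ [x]) ++ rest := by simp
        rw [hassoc]
        obtain ⟨skip', hsk', heq⟩ := ih (pre ++ [x]) (skip ++ [x]) ta
          (fun r hr => by
            simp only [List.mem_append, List.mem_singleton]
            rintro (h1 | rfl)
            · exact hpre r (List.mem_cons_of_mem _ hr) h1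
            · exact hxrest hr)
          (List.nodup_cons.1 hnd).2
          (fun a ha b hb => hnc a (List.mem_cons_of_mem _ ha) b (List.mem_cons_of_mem _ hb))
          (fun y hy => by
            rcases List.mem_append.1 hy with h1 | h2
            · exact hskip y h1
            · simp at h2; subst h2; exact hxS)
        refine ⟨skip', hsk', ?_⟩
        rw [heq]
        have hPx : decide (x ∈ S) = false := by simp [hxS]
        simp [pvStep, hPx, hxS]

theorem pv_round_eq (S out skip : List Int) (hInv : pvInv out) (hsk : ∀ x ∈ skip, x ∉ S) :
    ∃ skip', (∀ x ∈ skip', x ∉ S) ∧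
      hsRound S out skip = (out.flatMap (pvStep (fun x => decide (x ∈ S))), skip',
        out.any (fun x => decide (x ∈ S))) := by
  have hnc : ∀ a ∈ out, ∀ b ∈ out, a ≠ 2*b ∧ a ≠ 2*b+1 := by
    intro a ha b hb
    constructor <;> intro he <;>
      exact hInv.2.2 a ha b hb (pv_sdesc_child' (by omega))
  obtain ⟨skip', h1, h2⟩ := pv_round_fold S out [] skip false (by simp) hInv.1 hnc hsk
  exact ⟨skip', h1, by simpa using h2⟩

theorem pv_loop_run (S : List Int) (hb : ∀ x ∈ S, 1 ≤ x ∧ x ≤ 2^30) :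
    ∀ (f k : Nat) (skip : List Int) (b : Bool), 32 ≤ k + f → (∀ x ∈ skip, x ∉ S) →
    (b = false → pvStab (fun x => decide (x ∈ S)) k) →
    hsLoop S f (pvIter (fun x => decide (x ∈ S)) k [1]) skip b
      = pvIter (fun x => decide (x ∈ S)) 31 [1] := by
  intro f
  induction f with
  | zero =>
    intro k skip b hk hskip hstab
    cases b
    · show pvIter (fun x => decide (x ∈ S)) k [1] = _
      exact pv_iter_eq31 (fun x hx => (hb x (of_decide_eq_true hx)).2) (Or.inl (hstab rfl))
    · show pvIter (fun x => decide (x ∈ S)) k [1] = _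
      exact pv_iter_eq31 (fun x hx => (hb x (of_decide_eq_true hx)).2) (Or.inr (by omega))
  | succ f ih =>
    intro k skip b hk hskip hstab
    cases b
    · show pvIter (fun x => decide (x ∈ S)) k [1] = _
      exact pv_iter_eq31 (fun x hx => (hb x (of_decide_eq_true hx)).2) (Or.inl (hstab rfl))
    · show hsLoop S (f+1) (pvIter (fun x => decide (x ∈ S)) k [1]) skip true = _
      obtain ⟨skip', hsk', heq⟩ :=
        pv_round_eq S (pvIter (fun x => decide (x ∈ S)) k [1]) skip
          (pv_inv_iter _ k) hskip
      simp only [hsLoop, heq]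
      rw [← pv_iter_succ']
      apply ih (k+1) skip' _ (by omega) hsk'
      intro hany
      have hstk : pvStab (fun x => decide (x ∈ S)) k := by
        intro x hx
        have := List.any_eq_false.1 hany x hx
        simpa using this
      intro x hx
      rw [pv_iter_succ', pv_flatMap_fix hstk] at hx
      exact hstk x hx

-- ---- the two ancestor collections have the same members ----
theorem pv_branch_collapse (m : Int) :
    (if PySem.Int.mod m 2 = 0 then PySem.Int.floordiv m 2 else PySem.Int.floordiv (m-1) 2)
      = m / 2 := by
  have h1 : PySem.Int.mod m 2 = m % 2 := PySem.Int.mod_eq_emod_of_pos (by norm_num)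
  have h2 : PySem.Int.floordiv m 2 = m / 2 := PySem.Int.floordiv_eq_ediv_of_pos (by norm_num)
  have h3 : PySem.Int.floordiv (m-1) 2 = (m-1) / 2 := PySem.Int.floordiv_eq_ediv_of_pos (by norm_num)
  rw [h1, h2, h3]
  split_ifs with h <;> omega

theorem pv_altAnc_eq (m : Int) (s : PySem.Set Int) :
    altAnc m s = if 1 ≤ m then altAnc (m/2) (PySem.Set.add s m) else s := by
  rw [altAnc]
  rw [PySem.Int.floordiv_eq_ediv_of_pos (by norm_num : (0:Int) < 2)]
  simp

theorem pv_inner_sim :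
    ∀ (f : Nat) (m : Int) (acc : List Int) (s : PySem.Set Int),
    1 ≤ m → m < 2^f → (∀ x, x ∈ acc ↔ x ∈ s) →
    ∀ x, x ∈ hsInner f m acc ↔ x ∈ altAnc (PySem.Int.floordiv m 2) s := by
  intro f
  induction f with
  | zero =>
    intro m acc s h1 hlt _
    exfalso
    norm_num at hlt
    omega
  | succ f ih =>
    intro m acc s h1 hlt hme x
    have hfd : PySem.Int.floordiv m 2 = m / 2 := PySem.Int.floordiv_eq_ediv_of_pos (by norm_num)
    by_cases hm1 : m = 1
    · subst hm1
      have hL : hsInner (f+1) 1 acc = acc := by simp [hsInner]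
      rw [hL, hfd, show (1:Int)/2 = 0 from by decide, pv_altAnc_eq,
        if_neg (show ¬((1:Int) ≤ 0) from by norm_num)]
      exact hme x
    · simp only [hsInner, if_neg hm1]
      rw [pv_branch_collapse]
      rw [hfd, pv_altAnc_eq, if_pos (by omega : (1:Int) ≤ m/2)]
      have hp : (2:Int)^(f+1) = 2 * 2^f := by ring
      have h1' : 1 ≤ m / 2 := by omega
      have hlt' : m / 2 < 2^f := by omega
      have hme' : ∀ y, (y ∈ if m/2 ∈ acc then acc else acc ++ [m/2]) ↔ y ∈ PySem.Set.add s (m/2) := by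
        intro y
        rw [PySem.Set.mem_add]
        by_cases hy : m/2 ∈ acc
        · rw [if_pos hy]
          constructor
          · intro h; exact Or.inl ((hme y).1 h)
          · rintro (h | rfl)
            · exact (hme y).2 h
            · exact hy
        · rw [if_neg hy]
          simp only [List.mem_append, List.mem_singleton]
          constructor
          · rintro (h | rfl)
            · exact Or.inl ((hme y).1 h)
            · exact Or.inr rfl
          · rintro (h | rfl)
            · exact Or.inl ((hme y).2 h)
            · exact Or.inr rfl
      have := ih (m/2) (if m/2 ∈ acc then acc else acc ++ [m/2]) (PySem.Set.add s (m/2))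
        h1' hlt' hme' x
      rw [PySem.Int.floordiv_eq_ediv_of_pos (by norm_num : (0:Int) < 2)] at this
      exact this

theorem pv_tosub_sim :
    ∀ (l : List Int) (acc : List Int) (s : PySem.Set Int),
    (∀ n ∈ l, 0 ≤ n ∧ n ≤ 2^31) → (∀ x, x ∈ acc ↔ x ∈ s) →
    ∀ x, x ∈ l.foldl (fun acc n => if n = 0 then acc else hsInner 64 n acc) acc ↔
         x ∈ l.foldl (fun s n => altAnc (PySem.Int.floordiv n 2) s) s := by
  intro l
  induction l with
  | nil => intro acc s _ hme x; exact hme x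
  | cons n rest ih =>
    intro acc s hdom hme x
    simp only [List.foldl_cons]
    have hfd : PySem.Int.floordiv n 2 = n / 2 := PySem.Int.floordiv_eq_ediv_of_pos (by norm_num)
    by_cases hn0 : n = 0
    · subst hn0
      rw [if_pos rfl]
      apply ih _ _ (fun y hy => hdom y (List.mem_cons_of_mem _ hy))
      intro y
      rw [hfd, show (0:Int)/2 = 0 from by decide, pv_altAnc_eq,
        if_neg (show ¬((1:Int) ≤ 0) from by norm_num)]
      exact hme y
    · have h0 := (hdom n List.mem_cons_self).1
      have h31 := (hdom n List.mem_cons_self).2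
      rw [if_neg hn0]
      apply ih _ _ (fun y hy => hdom y (List.mem_cons_of_mem _ hy))
      intro y
      exact pv_inner_sim 64 n acc s (by omega) (by norm_num; omega) hme y

theorem pv_altAnc_bounds :
    ∀ (m : Int) (s : PySem.Set Int), (∀ x ∈ s, 1 ≤ x ∧ x ≤ 2^30) → m ≤ 2^30 →
    ∀ x ∈ altAnc m s, 1 ≤ x ∧ x ≤ 2^30 := by
  intro m s
  induction m, s using altAnc.induct with
  | case1 m s h ih =>
    intro hs hm x hx
    rw [pv_altAnc_eq, if_pos h] at hx
    have hfd : PySem.Int.floordiv m 2 = m / 2 := PySem.Int.floordiv_eq_ediv_of_pos (by norm_num)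
    rw [hfd] at ih
    refine ih ?_ ?_ x hx
    · intro y hy
      rcases (PySem.Set.mem_add s m y).1 hy with hy' | rfl
      · exact hs y hy'
      · exact ⟨h, hm⟩
    · omega
  | case2 m s h =>
    intro hs _ x hx
    rw [pv_altAnc_eq, if_neg h] at hx
    exact hs x hx

theorem pv_internal_bounds :
    ∀ (l : List Int) (s : PySem.Set Int), (∀ n ∈ l, n ≤ 2^31) → (∀ x ∈ s, 1 ≤ x ∧ x ≤ 2^30) →
    ∀ x ∈ l.foldl (fun s n => altAnc (PySem.Int.floordiv n 2) s) s, 1 ≤ x ∧ x ≤ 2^30 := by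
  intro l
  induction l with
  | nil => intro s _ hs; exact hs
  | cons n rest ih =>
    intro s hd hs
    simp only [List.foldl_cons]
    apply ih _ (fun y hy => hd y (List.mem_cons_of_mem _ hy))
    apply pv_altAnc_bounds _ _ hs
    rw [PySem.Int.floordiv_eq_ediv_of_pos (by norm_num : (0:Int) < 2)]
    have hn := hd n List.mem_cons_self
    have h30 : (2:Int)^30 = 1073741824 := by norm_num
    have h31 : (2:Int)^31 = 2147483648 := by norm_num
    omega

-- ===== VERDICT (by name: the statement is the Claim_ definition above) =====
theorem hs_n_to_hstr_inclusive_py_spec : Claim_equal_hs_n_to_hstr_inclusive_py := by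
  intro n_list hdom hpre
  unfold Spec_hs_n_to_hstr_inclusive_py
  have hdom' : ∀ n ∈ n_list, 0 ≤ n ∧ n ≤ 2^31 := by
    intro n hn
    unfold Dom_hs_n_to_hstr_inclusive_py at hdom
    rw [List.all_eq_true] at hdom
    have hd := hdom n hn
    unfold pvDomInt at hd
    simp only [decide_eq_true_eq] at hd
    refine ⟨hpre n hn, ?_⟩
    have h31 : (2:Int)^31 = 2147483648 := by norm_num
    omega
  have hmem : ∀ x, x ∈ hsToSubdivide n_list ↔ x ∈ altInternal n_list := by
    intro x
    exact pv_tosub_sim n_list [] PySem.Set.empty hdom'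
      (fun y => by constructor <;> intro h <;> simp [PySem.Set.empty] at h) x
  have hbI : ∀ x ∈ altInternal n_list, 1 ≤ x ∧ x ≤ 2^30 :=
    pv_internal_bounds n_list PySem.Set.empty (fun n hn => (hdom' n hn).2)
      (fun x hx => by simp [PySem.Set.empty] at hx)
  have hbS : ∀ x ∈ hsToSubdivide n_list, 1 ≤ x ∧ x ≤ 2^30 :=
    fun x hx => hbI x ((hmem x).1 hx)
  have hPQ : (fun x => decide (x ∈ hsToSubdivide n_list))
      = (fun x : Int => (altInternal n_list).contains x) := by
    funext x
    have h := hmem x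
    by_cases hx : x ∈ hsToSubdivide n_list
    · have hx' : x ∈ altInternal n_list := h.1 hx
      simp [hx, hx']
    · have hx' : x ∉ altInternal n_list := fun h2 => hx (h.2 h2)
      simp [hx, hx']
  have hA : hs_n_to_hstr_inclusive_py n_list
      = pvIter (fun x => decide (x ∈ hsToSubdivide n_list)) 31 [1] := by
    show hsLoop (hsToSubdivide n_list) 64 [1] []
        (decide (PySem.List.len (hsToSubdivide n_list) ≠ 0)) = _
    have := pv_loop_run (hsToSubdivide n_list) hbS 64 0 []
      (decide (PySem.List.len (hsToSubdivide n_list) ≠ 0)) (by omega)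
      (fun x hx => absurd hx (List.not_mem_nil)) ?_
    · exact this
    · intro hfalse
      have hSnil : hsToSubdivide n_list = [] := by simpa using hfalse
      intro x hx
      simp [hSnil]
  have hB : hs_n_to_hstr_inclusive_py_alt n_list
      = pvIter (fun x => decide (x ∈ hsToSubdivide n_list)) 31 [1] := by
    show altDfs (altInternal n_list) 64 1 = _
    rw [pv_altDfs_eq, ← hPQ]
    exact pv_iter_eq31 (fun x hx => (hbS x (of_decide_eq_true hx)).2) (Or.inr (by omega))
  rw [hA, hB]
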